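-- pv_equiv track=rewrite | github.com/serggavr/1t_hadoop | app/app.py | on_group_el
-- ===== SOURCE A (Python) =====
-- def on_group_el(dataArr, groups_quantity):
--     group_len = round(len(dataArr) / groups_quantity)
--     counter_el = 0
--     counter_group = 0
--     group = []
--     groups = []
--     for index in range(len(dataArr)):
--         if counter_el < group_len - 1:
--             group.append(index + 1)
--             counter_el += 1
--         else:
--             group.append(index + 1)
--             groups.append(group)
--             counter_el = 0
--             counter_group += 1
--             group = []
--         if len(group) > 0 and index + 1 == len(dataArr):
--             groups.append(group)
--
--     grouped_el = {}
--     for group in groups: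
--         name = f"{group[0]}-{group[-1]}"
--         for el in group:
--             grouped_el[el] = name
--
--     return grouped_el
-- ===== SOURCE B (Python) =====
-- def on_group_el(dataArr, groups_quantity):
--     group_len = round(len(dataArr) / groups_quantity)
--     n = len(dataArr)
--     step = group_len if group_len > 1 else 1
--     grouped_el = {}
--     for i in range(0, n, step):
--         hi = min(i + step, n)
--         name = f"{i + 1}-{hi}"
--         for k in range(i + 1, hi + 1):
--             grouped_el[k] = name
--     return grouped_el
-- ===== Notes on version B (the rewrite author's own statement) =====
-- stated objective: simpler
-- what changed: Replaces A's stateful counter/group accumulation pass plus a separate labeling pass over the collected groups by a single loop over range(0, n, step) that computes each chunk's range label directly from its start index.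
import Mathlib
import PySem

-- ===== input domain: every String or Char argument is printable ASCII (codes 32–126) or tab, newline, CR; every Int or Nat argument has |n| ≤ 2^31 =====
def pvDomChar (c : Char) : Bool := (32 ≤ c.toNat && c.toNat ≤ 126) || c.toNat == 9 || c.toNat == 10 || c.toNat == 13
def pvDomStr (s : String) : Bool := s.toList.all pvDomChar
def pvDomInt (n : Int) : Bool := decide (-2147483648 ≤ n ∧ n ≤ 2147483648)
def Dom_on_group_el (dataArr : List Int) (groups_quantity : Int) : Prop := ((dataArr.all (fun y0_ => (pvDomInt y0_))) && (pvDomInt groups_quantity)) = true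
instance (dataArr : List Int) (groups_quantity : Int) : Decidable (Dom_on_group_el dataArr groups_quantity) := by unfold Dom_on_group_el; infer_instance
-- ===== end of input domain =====

-- B replaces A's stateful counter/group accumulation and separate labeling pass by one
-- chunk-driven loop over range(0, n, step); same dict, simpler decomposition (no speed claim).

-- Shared transliteration of Python's `round(x / y)` for integer x, y ≠ 0: round-half-even of
-- the exact rational x/y (exact on the tested domain; at y = 0 Python raises ZeroDivisionError,
-- excluded by Pre_, and this total function returns a junk value).
def pyRoundDiv (x y : Int) : Int :=
  let y' := if y < 0 then -y else y
  let x' := if y < 0 then -x else x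
  let q := x' / y'   -- Euclidean = floor here since y' ≥ 0
  let r := x' - q * y'
  if 2 * r < y' then q else if y' < 2 * r then q + 1 else if q % 2 = 0 then q else q + 1

-- ===== PORT A =====
-- loop body of A's first `for index in range(len(dataArr))` pass, state = (counter_el, counter_group, group, groups)
def loopA (group_len n : Int) (st : Int × Int × List Int × List (List Int)) (index : Int) :
    Int × Int × List Int × List (List Int) :=
  let st1 := if st.1 < group_len - 1
    then (st.1 + 1, st.2.1, st.2.2.1 ++ [index + 1], st.2.2.2)
    else (0, st.2.1 + 1, ([] : List Int), st.2.2.2 ++ [st.2.2.1 ++ [index + 1]])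
  if 0 < st1.2.2.1.length ∧ index + 1 = n
    then (st1.1, st1.2.1, st1.2.2.1, st1.2.2.2 ++ [st1.2.2.1])
    else st1

-- body of A's second loop: label one group and insert all its elements
-- (group[0] / group[-1] via pyGetD with default 0: every group A builds is nonempty, so exact)
def insGroupA (d : PySem.Dict Int String) (group : List Int) : PySem.Dict Int String :=
  let name := PySem.Int.toStr (PySem.List.pyGetD group 0 0) ++ "-" ++
              PySem.Int.toStr (PySem.List.pyGetD group (-1) 0)
  group.foldl (fun d el => d.insert el name) d

def on_group_el (dataArr : List Int) (groups_quantity : Int) : List (Int × String) :=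
  let n : Int := dataArr.length
  let group_len := pyRoundDiv n groups_quantity
  let fin := (PySem.List.pyRange 0 n 1).foldl (loopA group_len n)
      ((0 : Int), (0 : Int), ([] : List Int), ([] : List (List Int)))
  (fin.2.2.2.foldl insGroupA PySem.Dict.empty).items

-- ===== PORT B =====
-- body of B's `for i in range(0, n, step)` loop: label the chunk [i+1 .. min(i+step, n)] directly
def loopB (step n : Int) (d : PySem.Dict Int String) (i : Int) : PySem.Dict Int String :=
  let hi := min (i + step) n
  let name := PySem.Int.toStr (i + 1) ++ "-" ++ PySem.Int.toStr hi
  (PySem.List.pyRange (i + 1) (hi + 1) 1).foldl (fun d k => d.insert k name) d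

def on_group_el_alt (dataArr : List Int) (groups_quantity : Int) : List (Int × String) :=
  let n : Int := dataArr.length
  let group_len := pyRoundDiv n groups_quantity
  let step := if group_len > 1 then group_len else 1
  ((PySem.List.pyRange 0 n step).foldl (loopB step n) PySem.Dict.empty).items

-- ===== PRECONDITION & SPEC =====
-- Pre_ excludes exactly groups_quantity = 0, where A raises ZeroDivisionError (B raises too).
def Pre_on_group_el (dataArr : List Int) (groups_quantity : Int) : Prop := groups_quantity ≠ 0
instance (dataArr : List Int) (groups_quantity : Int) : Decidable (Pre_on_group_el dataArr groups_quantity) := by unfold Pre_on_group_el; infer_instance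
def pvWitness_on_group_el : List Int × Int := ([1, 2, 3], 2)

def Spec_on_group_el (dataArr : List Int) (groups_quantity : Int) (out : List (Int × String)) : Prop := out = on_group_el_alt dataArr groups_quantity
instance (dataArr : List Int) (groups_quantity : Int) (out : List (Int × String)) : Decidable (Spec_on_group_el dataArr groups_quantity out) := by unfold Spec_on_group_el; infer_instance

-- ===== CLAIM (what is proved, stated in full; the proofs are below) =====
def Claim_equal_on_group_el : Prop := ∀ (dataArr : List Int) (groups_quantity : Int), Dom_on_group_el dataArr groups_quantity → Pre_on_group_el dataArr groups_quantity → Spec_on_group_el dataArr groups_quantity (on_group_el dataArr groups_quantity)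

-- ===== LEMMAS AND PROOFS =====

-- the effective chunk width both programs use: group_len if > 1, else 1
def stepOf (g : Int) : Int := if g > 1 then g else 1

theorem stepOf_pos (g : Int) : 0 < stepOf g := by
  unfold stepOf; split <;> omega

-- the list of groups A builds, as closed-form chunks of consecutive integers
def chunkListFrom (n g a : Int) : List (List Int) :=
  if _h : a < n then
    PySem.List.pyRange (a + 1) (min (a + stepOf g) n + 1) 1 :: chunkListFrom n g (a + stepOf g)
  else []
termination_by (n - a).toNat
decreasing_by have := stepOf_pos g; omega

theorem pyRange_pos_eq_nil {a b s : Int} (hs : 0 < s) (h : b ≤ a) :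
    PySem.List.pyRange a b s = [] := by
  rw [PySem.List.pyRange_of_pos a b hs, if_neg (by omega)]
  simp

theorem pyRange_pos_cons {a b s : Int} (hs : 0 < s) (h : a < b) :
    PySem.List.pyRange a b s = a :: PySem.List.pyRange (a + s) b s := by
  rw [PySem.List.pyRange_of_pos a b hs, PySem.List.pyRange_of_pos (a + s) b hs, if_pos h]
  by_cases h2 : a + s < b
  · rw [if_pos h2]
    have hc : ((b - a + s - 1) / s).toNat = ((b - (a + s) + s - 1) / s).toNat + 1 := by
      have : b - a + s - 1 = (b - (a + s) + s - 1) + 1 * s := by ring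
      rw [this, Int.add_mul_ediv_right _ _ (by omega : s ≠ 0)]
      have h0 : 0 ≤ (b - (a + s) + s - 1) / s :=
        Int.ediv_nonneg (by omega) (by omega)
      omega
    rw [hc, List.range_succ_eq_map]
    simp only [List.map_cons, List.map_map]
    refine List.cons_eq_cons.mpr ⟨by push_cast; ring, ?_⟩
    apply List.map_congr_left
    intro k _
    simp only [Function.comp_apply]
    push_cast
    ring
  · rw [if_neg h2]
    have h1 : (1 : Int) ≤ (b - a + s - 1) / s :=
      Int.le_ediv_iff_mul_le hs |>.mpr (by omega)
    have h2' : (b - a + s - 1) / s < 2 := by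
      rw [Int.ediv_lt_iff_lt_mul hs]; omega
    have : ((b - a + s - 1) / s).toNat = 1 := by omega
    rw [this]
    simp

-- the branch condition of A, rephrased through the effective step
theorem condA_iff {g a i : Int} (h1 : a ≤ i) (h2 : i ≤ a + stepOf g - 1) :
    (i - a < g - 1) ↔ (i < a + stepOf g - 1) := by
  by_cases hg : g > 1
  · simp only [stepOf, if_pos hg] at h2 ⊢; omega
  · simp only [stepOf, if_neg hg] at h2 ⊢; omega

-- invariant of A's first loop: mid-chunk state at index i with chunk start a
theorem loopA_inv (g n : Int) (k : Nat) :
    ∀ (i a cg : Int) (gs : List (List Int)),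
      k = (n - i).toNat → 0 ≤ a → a ≤ i → i ≤ a + stepOf g - 1 → i < n →
      (((PySem.List.pyRange i n 1).foldl (loopA g n)
          (i - a, cg, PySem.List.pyRange (a + 1) (i + 1) 1, gs))).2.2.2
        = gs ++ chunkListFrom n g a := by
  induction k with
  | zero => intro i a cg gs hk _ _ _ hin; omega
  | succ k ih =>
    intro i a cg gs hk ha hai hstep hin
    rw [PySem.List.pyRange_one_cons hin, List.foldl_cons]
    have hgrow : PySem.List.pyRange (a + 1) (i + 1) 1 ++ [i + 1]
        = PySem.List.pyRange (a + 1) (i + 1 + 1) 1 :=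
      (PySem.List.pyRange_one_succ_right (by omega)).symm
    by_cases hmid : i < a + stepOf g - 1
    · -- mid-chunk: append to the current group
      have hc : i - a < g - 1 := (condA_iff hai hstep).mpr hmid
      by_cases hlast : i + 1 = n
      · -- last index: the trailing `if` flushes the partial group
        have hclose : chunkListFrom n g a
            = [PySem.List.pyRange (a + 1) (n + 1) 1] := by
          rw [chunkListFrom, dif_pos (by omega), chunkListFrom, dif_neg (by omega)]
          have : min (a + stepOf g) n = n := by omega
          rw [this]
        simp only [loopA, if_pos hc, hgrow]
        rw [if_pos (⟨by rw [PySem.List.pyRange_one_cons (show a + 1 < i + 1 + 1 by omega)]; simp, hlast⟩ :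
          0 < (PySem.List.pyRange (a + 1) (i + 1 + 1) 1).length ∧ i + 1 = n)]
        rw [pyRange_pos_eq_nil (by omega) (by omega : n ≤ i + 1)]
        simp [hclose, hlast]
      · simp only [loopA, if_pos hc, hgrow]
        rw [if_neg (by intro hcon; exact hlast hcon.2)]
        have h := ih (i + 1) a cg gs (by omega) ha (by omega) (by omega) (by omega)
        rw [show i + 1 - a = i - a + 1 from by omega] at h
        exact h
    · -- chunk boundary: close the group
      have hc : ¬ (i - a < g - 1) := fun hcon => hmid ((condA_iff hai hstep).mp hcon)
      have hieq : i = a + stepOf g - 1 := by omega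
      have hchunk : chunkListFrom n g a
          = PySem.List.pyRange (a + 1) (i + 1 + 1) 1 :: chunkListFrom n g (i + 1) := by
        rw [chunkListFrom, dif_pos (by omega)]
        have hmin : min (a + stepOf g) n = i + 1 := by omega
        rw [hmin]
        have : a + stepOf g = i + 1 := by omega
        rw [this]
      simp only [loopA, if_neg hc, hgrow]
      rw [if_neg (by simp)]
      by_cases hlast : i + 1 = n
      · rw [pyRange_pos_eq_nil (by omega) (by omega : n ≤ i + 1)]
        have hnil2 : chunkListFrom n g (i + 1) = [] := by
          rw [chunkListFrom]; exact dif_neg (by omega)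
        simp [hchunk, hnil2]
      · have := ih (i + 1) (i + 1) (cg + 1) (gs ++ [PySem.List.pyRange (a + 1) (i + 1 + 1) 1])
          (by omega) (by omega) (by omega) (by have := stepOf_pos g; omega) (by omega)
        have hz : i + 1 - (i + 1) = (0 : Int) := by omega
        have hnil : PySem.List.pyRange (i + 1 + 1) (i + 1 + 1) 1 = [] :=
          PySem.List.pyRange_one_eq_nil (by omega)
        rw [hz, hnil] at this
        rw [this, hchunk]
        simp

-- A's first loop produces exactly the chunk list
theorem A_groups_eq (g n : Int) (hn : 0 ≤ n) :
    (((PySem.List.pyRange 0 n 1).foldl (loopA g n)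
        ((0 : Int), (0 : Int), ([] : List Int), ([] : List (List Int))))).2.2.2
      = chunkListFrom n g 0 := by
  by_cases h : 0 < n
  · have := loopA_inv g n (n - 0).toNat 0 0 0 [] rfl le_rfl le_rfl
      (by have := stepOf_pos g; omega) h
    simpa [PySem.List.pyRange_one_eq_nil (le_refl (1 : Int))] using this
  · rw [PySem.List.pyRange_one_eq_nil (by omega), chunkListFrom, dif_neg (by omega)]
    simp

-- B's loop over range(0, n, step) equals A's second loop over the chunk list
theorem B_eq_chunks (g n : Int) (k : Nat) :
    ∀ (a : Int) (d : PySem.Dict Int String),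
      k = (n - a).toNat → 0 ≤ a →
      (PySem.List.pyRange a n (stepOf g)).foldl (loopB (stepOf g) n) d
        = (chunkListFrom n g a).foldl insGroupA d := by
  induction k using Nat.strong_induction_on with
  | _ k ih =>
    intro a d hk ha
    by_cases h : a < n
    · rw [pyRange_pos_cons (stepOf_pos g) h, List.foldl_cons,
        chunkListFrom, dif_pos h, List.foldl_cons]
      have hhi : a + 1 ≤ min (a + stepOf g) n := by have := stepOf_pos g; omega
      have hbody : loopB (stepOf g) n d a
          = insGroupA d (PySem.List.pyRange (a + 1) (min (a + stepOf g) n + 1) 1) := by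
        unfold loopB insGroupA
        have h0 : PySem.List.pyGetD
            (PySem.List.pyRange (a + 1) (min (a + stepOf g) n + 1) 1) 0 0 = a + 1 := by
          rw [PySem.List.pyRange_one_cons (by omega), PySem.List.pyGetD_zero_cons]
        have hlast : PySem.List.pyGetD
            (PySem.List.pyRange (a + 1) (min (a + stepOf g) n + 1) 1) (-1) 0
            = min (a + stepOf g) n := by
          rw [PySem.List.pyRange_one_succ_right (by omega),
            PySem.List.pyGetD_neg_one_append_singleton]
        rw [h0, hlast]
      rw [hbody]
      exact ih ((n - (a + stepOf g)).toNat) (by have := stepOf_pos g; omega) _ _ rfl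
        (by have := stepOf_pos g; omega)
    · rw [pyRange_pos_eq_nil (stepOf_pos g) (by omega), chunkListFrom, dif_neg h]
      simp

-- ===== VERDICT (by name: the statement is the Claim_ definition above) =====
theorem on_group_el_spec : Claim_equal_on_group_el := by
  intro dataArr groups_quantity _ _
  unfold Spec_on_group_el on_group_el on_group_el_alt
  have hstep : (if pyRoundDiv (dataArr.length : Int) groups_quantity > 1
      then pyRoundDiv (dataArr.length : Int) groups_quantity else 1)
      = stepOf (pyRoundDiv (dataArr.length : Int) groups_quantity) := rfl
  simp only [hstep]
  rw [A_groups_eq (pyRoundDiv (dataArr.length : Int) groups_quantity) (dataArr.length : Int)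
      (by positivity),
    ← B_eq_chunks (pyRoundDiv (dataArr.length : Int) groups_quantity) (dataArr.length : Int)
      ((dataArr.length : Int) - 0).toNat 0 PySem.Dict.empty rfl le_rfl]
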